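-- pv_equiv track=rewrite | github.com/SantoshNaranap/nexus_data_s3 | backend/app/services/chat_service.py | _get_thinking_summary
-- ===== SOURCE A (Python) =====
-- def _get_thinking_summary(datasource: str, message: str) -> str:
--     """Generate a thinking summary for the collapsible thinking indicator."""
--     message_lower = message.lower()
--
--     # Build a descriptive thinking message based on what we're doing
--     thinking_parts = []
--
--     # Add datasource context
--     datasource_names = {
--         "s3": "Amazon S3",
--         "jira": "JIRA",
--         "mysql": "MySQL database",
--         "google_workspace": "Google Workspace",
--         "slack": "Slack",
--         "shopify": "Shopify",
--     }
--     ds_name = datasource_names.get(datasource, datasource)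
--
--     # Analyze query intent
--     if any(kw in message_lower for kw in ["search", "find", "look for", "where"]):
--         thinking_parts.append(f"Searching {ds_name} for relevant information")
--     elif any(kw in message_lower for kw in ["list", "show", "get", "what"]):
--         thinking_parts.append(f"Retrieving data from {ds_name}")
--     elif any(kw in message_lower for kw in ["compare", "difference", "between"]):
--         thinking_parts.append(f"Comparing information in {ds_name}")
--     elif any(kw in message_lower for kw in ["similar", "apps", "market", "competitors"]):
--         thinking_parts.append("Analyzing marketplace and competitive landscape")
--     else:
--         thinking_parts.append(f"Querying {ds_name}")
--
--     return thinking_parts[0] if thinking_parts else f"Processing request for {ds_name}"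
-- ===== SOURCE B (Python) =====
-- def _get_thinking_summary(datasource: str, message: str) -> str:
--     """Generate a thinking summary for the collapsible thinking indicator."""
--     message_lower = message.lower()
--     ds_name = {
--         "s3": "Amazon S3",
--         "jira": "JIRA",
--         "mysql": "MySQL database",
--         "google_workspace": "Google Workspace",
--         "slack": "Slack",
--         "shopify": "Shopify",
--     }.get(datasource, datasource)
--
--     # Flat keyword -> priority map; the first-matching-rule semantics of the
--     # original chain is exactly "smallest priority among keywords present".
--     kw_priority = {
--         "search": 0, "find": 0, "look for": 0, "where": 0,
--         "list": 1, "show": 1, "get": 1, "what": 1,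
--         "compare": 2, "difference": 2, "between": 2,
--         "similar": 3, "apps": 3, "market": 3, "competitors": 3,
--     }
--     best = 4
--     for kw, prio in kw_priority.items():
--         if kw in message_lower:
--             best = min(best, prio)
--
--     summaries = [
--         f"Searching {ds_name} for relevant information",
--         f"Retrieving data from {ds_name}",
--         f"Comparing information in {ds_name}",
--         "Analyzing marketplace and competitive landscape",
--         f"Querying {ds_name}",
--     ]
--     return summaries[best]
-- ===== Notes on version B (the rewrite author's own statement) =====
-- stated objective: alternative
-- what changed: Replaces the early-exit if-elif chain (appending into a one-element list and indexing it) by a flat keyword-to-priority map scanned once with a running minimum, then an index into a summary table; correct because the first matching rule is exactly the smallest priority among keywords present.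
import Mathlib
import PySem

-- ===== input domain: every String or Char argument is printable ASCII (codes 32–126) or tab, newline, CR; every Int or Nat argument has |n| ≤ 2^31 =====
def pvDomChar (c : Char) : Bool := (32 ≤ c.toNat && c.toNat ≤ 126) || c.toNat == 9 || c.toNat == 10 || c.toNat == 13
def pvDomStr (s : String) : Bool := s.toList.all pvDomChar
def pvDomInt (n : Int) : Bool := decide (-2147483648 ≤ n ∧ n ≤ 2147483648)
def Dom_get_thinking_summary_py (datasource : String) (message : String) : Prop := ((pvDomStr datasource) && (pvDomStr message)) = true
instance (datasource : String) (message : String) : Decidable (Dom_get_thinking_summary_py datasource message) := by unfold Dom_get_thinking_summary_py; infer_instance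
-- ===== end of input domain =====

-- B replaces A's early-exit if-elif chain by a flat keyword→priority map scanned once
-- with a running minimum, then an index into a summary table; objective: alternative.

-- ===== PORT A =====
def get_thinking_summary_py (datasource : String) (message : String) : String :=
  let message_lower := PySem.Str.lower message
  let datasource_names : PySem.Dict String String := PySem.Dict.ofList
    [("s3", "Amazon S3"), ("jira", "JIRA"), ("mysql", "MySQL database"),
     ("google_workspace", "Google Workspace"), ("slack", "Slack"), ("shopify", "Shopify")]
  let ds_name := datasource_names.getD datasource datasource
  let thinking_parts : List String := []
  let thinking_parts :=
    if ["search", "find", "look for", "where"].any (fun kw => PySem.Str.isIn kw message_lower) then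
      thinking_parts ++ ["Searching " ++ ds_name ++ " for relevant information"]
    else if ["list", "show", "get", "what"].any (fun kw => PySem.Str.isIn kw message_lower) then
      thinking_parts ++ ["Retrieving data from " ++ ds_name]
    else if ["compare", "difference", "between"].any (fun kw => PySem.Str.isIn kw message_lower) then
      thinking_parts ++ ["Comparing information in " ++ ds_name]
    else if ["similar", "apps", "market", "competitors"].any (fun kw => PySem.Str.isIn kw message_lower) then
      thinking_parts ++ ["Analyzing marketplace and competitive landscape"]
    else
      thinking_parts ++ ["Querying " ++ ds_name]
  match thinking_parts with
  | t :: _ => t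
  | [] => "Processing request for " ++ ds_name

-- ===== PORT B =====
-- flat keyword→priority table (Source B's kw_priority dict, in insertion order)
def pvKwPriority : List (String × Nat) :=
  [("search", 0), ("find", 0), ("look for", 0), ("where", 0),
   ("list", 1), ("show", 1), ("get", 1), ("what", 1),
   ("compare", 2), ("difference", 2), ("between", 2),
   ("similar", 3), ("apps", 3), ("market", 3), ("competitors", 3)]

def get_thinking_summary_py_alt (datasource : String) (message : String) : String :=
  let message_lower := PySem.Str.lower message
  let ds_name := (PySem.Dict.ofList
    [("s3", "Amazon S3"), ("jira", "JIRA"), ("mysql", "MySQL database"),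
     ("google_workspace", "Google Workspace"), ("slack", "Slack"), ("shopify", "Shopify")]).getD datasource datasource
  let best := pvKwPriority.foldl
    (fun best kc => if PySem.Str.isIn kc.1 message_lower then min best kc.2 else best) 4
  let summaries : List String :=
    ["Searching " ++ ds_name ++ " for relevant information",
     "Retrieving data from " ++ ds_name,
     "Comparing information in " ++ ds_name,
     "Analyzing marketplace and competitive landscape",
     "Querying " ++ ds_name]
  -- summaries[best]: best ≤ 4 always, so the index is in range and the default is never used
  summaries.getD best ""

-- ===== PRECONDITION & SPEC =====
def Spec_get_thinking_summary_py (datasource : String) (message : String) (out : String) : Prop := out = get_thinking_summary_py_alt datasource message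
instance (datasource : String) (message : String) (out : String) : Decidable (Spec_get_thinking_summary_py datasource message out) := by unfold Spec_get_thinking_summary_py; infer_instance

-- ===== CLAIM (what is proved, stated in full; the proofs are below) =====
def Claim_equal_get_thinking_summary_py : Prop := ∀ (datasource : String) (message : String), Dom_get_thinking_summary_py datasource message → Spec_get_thinking_summary_py datasource message (get_thinking_summary_py datasource message)

-- ===== LEMMAS AND PROOFS =====

-- folding the running minimum over one priority group: matched ⇒ min with its priority
theorem pv_fold_group (ml : String) (c : Nat) (kws : List String) (a : Nat) :
    List.foldl (fun best kc => if PySem.Str.isIn kc.1 ml then min best kc.2 else best) a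
      (kws.map (fun k => (k, c)))
    = if kws.any (fun kw => PySem.Str.isIn kw ml) then min a c else a := by
  induction kws generalizing a with
  | nil => simp
  | cons h t ih =>
    simp only [List.map_cons, List.foldl_cons, List.any_cons]
    by_cases hk : PySem.Str.isIn h ml
    · rw [if_pos hk, ih]
      simp only [hk, Bool.true_or, if_pos]
      by_cases ht : t.any (fun kw => PySem.Str.isIn kw ml)
      · simp [ht, Nat.min_assoc]
      · simp [ht]
    · rw [if_neg hk, ih]
      rw [Bool.not_eq_true] at hk
      simp only [hk, Bool.false_or]

theorem pv_kw_split :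
    pvKwPriority =
      (["search", "find", "look for", "where"].map (fun k => (k, 0)))
      ++ (["list", "show", "get", "what"].map (fun k => (k, 1)))
      ++ (["compare", "difference", "between"].map (fun k => (k, 2)))
      ++ (["similar", "apps", "market", "competitors"].map (fun k => (k, 3))) := rfl

theorem pv_eq (datasource message : String) :
    get_thinking_summary_py datasource message = get_thinking_summary_py_alt datasource message := by
  unfold get_thinking_summary_py get_thinking_summary_py_alt
  rw [pv_kw_split]
  simp only [List.foldl_append, pv_fold_group]
  split_ifs <;> rfl

-- ===== VERDICT (by name: the statement is the Claim_ definition above) =====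
theorem get_thinking_summary_py_spec : Claim_equal_get_thinking_summary_py := by
  intro d m _
  unfold Spec_get_thinking_summary_py
  exact pv_eq d m
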